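-- pv_equiv track=rewrite | github.com/cmmmalik/mse | utilities.py | replace_1_string
-- ===== SOURCE A (Python) =====
-- def replace_1_string(s):
--     plindex = []
--
--     for i, f, m, l in zip(range(len(s)), s, s[1:], s[2:]):
--
--         if m == "1" and f.isalpha() and l.isalpha():
--             plindex.append(i + 1)
--     try:
--         int(s[-2:])
--     except ValueError:  # Means the last integer
--
--         try:
--             float(s[-3:])
--
--         except ValueError:
--
--             if s[-1] == "1":
--                 plindex.append(len(s) - 1)
--     strwithoutone = "".join([value for i, value in enumerate(s) if i not in plindex])
--
--     return strwithoutone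
-- ===== SOURCE B (Python) =====
-- def replace_1_string(s):
--     # Decide once whether the final character must also be dropped (same
--     # tail try/except semantics as the original).
--     try:
--         int(s[-2:])
--         drop_last = False
--     except ValueError:
--         try:
--             float(s[-3:])
--             drop_last = False
--         except ValueError:
--             drop_last = s[-1] == "1"
--     n = len(s)
--     out = []
--     for j, c in enumerate(s):
--         if c == "1" and 1 <= j <= n - 2 and s[j - 1].isalpha() and s[j + 1].isalpha():
--             continue
--         if drop_last and j == n - 1:
--             continue
--         out.append(c)
--     return "".join(out)
-- ===== Notes on version B (the rewrite author's own statement) =====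
-- stated objective: alternative
-- what changed: Replaces A's two-phase strategy (collect a list of indices to drop, then filter every position by list membership 'i not in plindex') with a single direct pass that tests each position's neighbourhood in place and keeps the tail outcome as one boolean flag instead of a list entry.
import Mathlib
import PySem

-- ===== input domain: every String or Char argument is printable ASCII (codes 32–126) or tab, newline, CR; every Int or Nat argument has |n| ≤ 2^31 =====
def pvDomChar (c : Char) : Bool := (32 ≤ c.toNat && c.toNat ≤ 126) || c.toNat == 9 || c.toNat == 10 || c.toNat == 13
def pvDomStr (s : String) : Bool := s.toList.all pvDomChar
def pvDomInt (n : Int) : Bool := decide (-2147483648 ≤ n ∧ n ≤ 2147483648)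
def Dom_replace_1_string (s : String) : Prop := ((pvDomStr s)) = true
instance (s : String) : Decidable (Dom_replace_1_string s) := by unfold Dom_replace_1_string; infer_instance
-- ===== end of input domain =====

-- B replaces A's index-list + 'i not in plindex' filtering with one direct pass over the string, keeping the tail try/except outcome as a single boolean flag (alternative decomposition, same cost).
-- A and B both raise IndexError on the empty string (s[-1]); Pre_ excludes exactly that input.

-- ===== PORT A =====
-- hand-written helper, shared by both ports: validity of `float(t)` (True = no ValueError);
-- exact for strings over the printable-ASCII/tab/newline/CR domain (checked exhaustively for len ≤ 3, the only lengths used: t = s[-3:]).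
def pvUnderscoreOkAux : Char → List Char → Bool
  | _, [] => true
  | prev, c :: rest =>
    if c = '_' then
      (PySem.Chars.isdigit prev &&
        (match rest with | d :: _ => PySem.Chars.isdigit d | [] => false))
        && pvUnderscoreOkAux c rest
    else pvUnderscoreOkAux c rest

def pvFloatValid (cs : List Char) : Bool :=
  if pvUnderscoreOkAux ' ' cs then
    let t0 := PySem.Chars.strip cs
    let t1 := t0.filter (fun c => c ≠ '_')
    let t : List Char := match t1 with
      | c :: r => if c = '+' ∨ c = '-' then r else c :: r
      | [] => []
    let l := t.map PySem.Chars.lowerChar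
    if l = ['i','n','f'] ∨ l = ['i','n','f','i','n','i','t','y'] ∨ l = ['n','a','n'] then true
    else
      let p1 := t.span (fun c => PySem.Chars.isdigit c)
      let p2 : List Char × List Char := match p1.2 with
        | '.' :: r => r.span (fun c => PySem.Chars.isdigit c)
        | r => ([], r)
      if p1.1.length + p2.1.length = 0 then false
      else match p2.2 with
        | [] => true
        | e :: r =>
          if e = 'e' ∨ e = 'E' then
            let r2 : List Char := match r with
              | c :: r' => if c = '+' ∨ c = '-' then r' else c :: r'
              | [] => []
            r2 ≠ [] && r2.all (fun c => PySem.Chars.isdigit c)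
          else false
  else false

def replace_1_string (s : String) : String :=
  let cs := s.toList
  let tail2 : List Char := PySem.List.slice cs (some (-2)) none   -- s[-2:]
  let tail3 : List Char := PySem.List.slice cs (some (-3)) none   -- s[-3:]
  let lastc : Option Char := PySem.List.pyGet? cs (-1)            -- s[-1]; none = IndexError, excluded by Pre_
  let quads := (List.range cs.length).zip
      (cs.zip ((PySem.List.slice cs (some 1) none).zip (PySem.List.slice cs (some 2) none)))
  let plindex : List Int :=
    quads.foldl (fun acc q =>
      if q.2.2.1 = '1' ∧ PySem.Chars.isalpha q.2.1 ∧ PySem.Chars.isalpha q.2.2.2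
      then acc ++ [(q.1 : Int) + 1] else acc) []
  let plindex : List Int :=
    match PySem.Int.ofChars? tail2 with
    | some _ => plindex
    | none =>
      if pvFloatValid tail3 then plindex
      else
        match lastc with
        | some c => if c = '1' then plindex ++ [(cs.length : Int) - 1] else plindex
        | none => plindex
  String.ofList (((PySem.List.enumerate cs).filter (fun p => decide (¬ p.1 ∈ plindex))).map (fun p => p.2))

-- ===== PORT B =====
def replace_1_string_alt (s : String) : String :=
  let cs := s.toList
  let tail2 : List Char := PySem.List.slice cs (some (-2)) none   -- s[-2:]
  let tail3 : List Char := PySem.List.slice cs (some (-3)) none   -- s[-3:]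
  let lastc : Option Char := PySem.List.pyGet? cs (-1)            -- s[-1]; none = IndexError, excluded by Pre_
  let n : Int := cs.length
  let dropLast : Bool :=
    match PySem.Int.ofChars? tail2 with
    | some _ => false
    | none =>
      if pvFloatValid tail3 then false
      else
        match lastc with
        | some c => decide (c = '1')
        | none => false
  -- the pyGetD reads are guarded by 1 ≤ j ∧ j ≤ n - 2, so the default is never the value used
  let out : List Char := (PySem.List.enumerate cs).foldl (fun (acc : List Char) (p : Int × Char) =>
    if p.2 = '1' ∧ 1 ≤ p.1 ∧ p.1 ≤ n - 2 ∧
        PySem.Chars.isalpha (PySem.List.pyGetD cs (p.1 - 1) ' ') ∧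
        PySem.Chars.isalpha (PySem.List.pyGetD cs (p.1 + 1) ' ') then acc
    else if dropLast = true ∧ p.1 = n - 1 then acc
    else acc ++ [p.2]) []
  String.ofList out

-- ===== PRECONDITION & SPEC =====
-- Pre_ excludes only the empty string, on which A raises IndexError (s[-1]).
def Pre_replace_1_string (s : String) : Prop := s ≠ ""
instance (s : String) : Decidable (Pre_replace_1_string s) := by unfold Pre_replace_1_string; infer_instance
def pvWitness_replace_1_string : String := "ab1cd"
def Spec_replace_1_string (s : String) (out : String) : Prop := out = replace_1_string_alt s
instance (s : String) (out : String) : Decidable (Spec_replace_1_string s out) := by unfold Spec_replace_1_string; infer_instance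

-- ===== CLAIM (what is proved, stated in full; the proofs are below) =====
def Claim_equal_replace_1_string : Prop := ∀ (s : String), Dom_replace_1_string s → Pre_replace_1_string s → Spec_replace_1_string s (replace_1_string s)

-- ===== LEMMAS AND PROOFS =====

-- proof-only helper: the index list built by A's zip loop
def pvLoop (cs : List Char) : List Int :=
  ((List.range cs.length).zip
      (cs.zip ((PySem.List.slice cs (some 1) none).zip (PySem.List.slice cs (some 2) none)))).foldl
    (fun acc q =>
      if q.2.2.1 = '1' ∧ PySem.Chars.isalpha q.2.1 ∧ PySem.Chars.isalpha q.2.2.2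
      then acc ++ [(q.1 : Int) + 1] else acc) []

lemma pvQuads_eq (cs : List Char) :
    (List.range cs.length).zip
      (cs.zip ((PySem.List.slice cs (some 1) none).zip (PySem.List.slice cs (some 2) none)))
    = (List.range (cs.length - 2)).map
        (fun k => (k, (cs.getD k ' ', (cs.getD (k+1) ' ', cs.getD (k+2) ' ')))) := by
  have e1 : PySem.List.slice cs (some 1) none = cs.drop 1 := by
    rw [PySem.List.slice_from cs (a := 1) (by norm_num)]; rfl
  have e2 : PySem.List.slice cs (some 2) none = cs.drop 2 := by
    rw [PySem.List.slice_from cs (a := 2) (by norm_num)]; rfl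
  rw [e1, e2]
  apply List.ext_getElem
  · simp; omega
  · intro i h1 h2
    simp only [List.length_zip, List.length_range, List.length_drop, List.length_map] at h1 h2
    simp only [List.getElem_zip, List.getElem_range, List.getElem_map, List.getElem_drop]
    rw [List.getD_eq_getElem _ _ (by omega), List.getD_eq_getElem _ _ (by omega),
        List.getD_eq_getElem _ _ (by omega)]
    simp [Nat.add_comm]

lemma pvLoop_mem (cs : List Char) (x : Int) :
    x ∈ pvLoop cs ↔ ∃ k : Nat, k + 2 < cs.length ∧ x = (k : Int) + 1 ∧
      cs.getD (k+1) ' ' = '1' ∧ PySem.Chars.isalpha (cs.getD k ' ')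
      ∧ PySem.Chars.isalpha (cs.getD (k+2) ' ') := by
  unfold pvLoop
  rw [pvQuads_eq, PySem.List.foldl_append_ite]
  simp only [List.nil_append, List.mem_map, List.mem_filter, List.mem_range, decide_eq_true_eq]
  constructor
  · rintro ⟨q, ⟨⟨k, hk, rfl⟩, hc⟩, rfl⟩
    exact ⟨k, by omega, rfl, hc.1, hc.2.1, hc.2.2⟩
  · rintro ⟨k, hk, rfl, h1, h2, h3⟩
    exact ⟨(k, (cs.getD k ' ', (cs.getD (k+1) ' ', cs.getD (k+2) ' '))),
      ⟨⟨k, by omega, rfl⟩, ⟨h1, h2, h3⟩⟩, rfl⟩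

lemma pvMid_iff (cs : List Char) (k : Nat) (hk : k < cs.length) :
    (cs.getD k ' ' = '1' ∧ 1 ≤ (k:Int) ∧ (k:Int) ≤ (cs.length:Int) - 2 ∧
      PySem.Chars.isalpha (PySem.List.pyGetD cs ((k:Int) - 1) ' ') ∧
      PySem.Chars.isalpha (PySem.List.pyGetD cs ((k:Int) + 1) ' '))
    ↔ (k:Int) ∈ pvLoop cs := by
  rw [pvLoop_mem]
  constructor
  · rintro ⟨h1, h2, h3, h4, h5⟩
    have hk1 : 1 ≤ k := by exact_mod_cast h2
    refine ⟨k - 1, by omega, by omega, ?_, ?_, ?_⟩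
    · rwa [Nat.sub_add_cancel hk1]
    · rwa [show (k:Int) - 1 = ((k - 1 : Nat) : Int) by omega,
        PySem.List.pyGetD_natCast] at h4
    · rw [show k - 1 + 2 = k + 1 by omega]
      rwa [show (k:Int) + 1 = ((k + 1 : Nat) : Int) by push_cast; ring,
        PySem.List.pyGetD_natCast] at h5
  · rintro ⟨j, hj, hx, h1, h2, h3⟩
    have hkj : k = j + 1 := by exact_mod_cast hx
    subst hkj
    refine ⟨h1, by omega, by omega, ?_, ?_⟩
    · rw [show ((j+1 : Nat):Int) - 1 = ((j : Nat) : Int) by push_cast; ring,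
        PySem.List.pyGetD_natCast]
      simpa using h2
    · rw [show ((j+1 : Nat):Int) + 1 = ((j + 2 : Nat) : Int) by push_cast; ring,
        PySem.List.pyGetD_natCast]
      simpa using h3

lemma pvCore (cs : List Char) (flag : Bool) :
    ((PySem.List.enumerate cs).filter
        (fun p => decide (¬ p.1 ∈ (pvLoop cs ++ if flag then [(cs.length:Int) - 1] else [])))).map
        (fun p => p.2)
    = (PySem.List.enumerate cs).foldl (fun acc p =>
        if p.2 = '1' ∧ 1 ≤ p.1 ∧ p.1 ≤ (cs.length:Int) - 2 ∧
            PySem.Chars.isalpha (PySem.List.pyGetD cs (p.1 - 1) ' ') ∧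
            PySem.Chars.isalpha (PySem.List.pyGetD cs (p.1 + 1) ' ') then acc
        else if flag = true ∧ p.1 = (cs.length:Int) - 1 then acc
        else acc ++ [p.2]) [] := by
  have hfun : (fun (acc : List Char) (p : Int × Char) =>
        if p.2 = '1' ∧ 1 ≤ p.1 ∧ p.1 ≤ (cs.length:Int) - 2 ∧
            PySem.Chars.isalpha (PySem.List.pyGetD cs (p.1 - 1) ' ') ∧
            PySem.Chars.isalpha (PySem.List.pyGetD cs (p.1 + 1) ' ') then acc
        else if flag = true ∧ p.1 = (cs.length:Int) - 1 then acc
        else acc ++ [p.2])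
      = (fun acc p =>
        if (¬ (p.2 = '1' ∧ 1 ≤ p.1 ∧ p.1 ≤ (cs.length:Int) - 2 ∧
            PySem.Chars.isalpha (PySem.List.pyGetD cs (p.1 - 1) ' ') ∧
            PySem.Chars.isalpha (PySem.List.pyGetD cs (p.1 + 1) ' ')) ∧
            ¬ (flag = true ∧ p.1 = (cs.length:Int) - 1))
        then acc ++ [p.2] else acc) := by
    funext acc p
    by_cases hc1 : (p.2 = '1' ∧ 1 ≤ p.1 ∧ p.1 ≤ (cs.length:Int) - 2 ∧
        PySem.Chars.isalpha (PySem.List.pyGetD cs (p.1 - 1) ' ') ∧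
        PySem.Chars.isalpha (PySem.List.pyGetD cs (p.1 + 1) ' ')) <;>
      by_cases hc2 : (flag = true ∧ p.1 = (cs.length:Int) - 1) <;>
      simp [hc1, hc2]
  rw [hfun, PySem.List.foldl_append_ite, List.nil_append]
  congr 1
  apply List.filter_congr
  intro p hp
  rcases (PySem.List.mem_enumerate_iff _ _ _).1 hp with ⟨k, hk, rfl⟩
  simp only [zero_add, decide_eq_decide]
  have hgd : cs[k] = cs.getD k ' ' := (List.getD_eq_getElem _ _ hk).symm
  have h2 : ((k:Int) ∈ (if flag then [(cs.length:Int) - 1] else ([] : List Int)))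
      ↔ (flag = true ∧ (k:Int) = (cs.length:Int) - 1) := by
    cases flag <;> simp
  rw [List.mem_append, h2, hgd, ← pvMid_iff cs k hk]
  tauto

lemma pvMain (cs : List Char) (plA : List Int) (flag : Bool)
    (h : plA = pvLoop cs ++ if flag then [(cs.length:Int) - 1] else []) :
    String.ofList (((PySem.List.enumerate cs).filter (fun p => decide (¬ p.1 ∈ plA))).map (fun p => p.2))
    = String.ofList ((PySem.List.enumerate cs).foldl (fun acc p =>
        if p.2 = '1' ∧ 1 ≤ p.1 ∧ p.1 ≤ (cs.length:Int) - 2 ∧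
            PySem.Chars.isalpha (PySem.List.pyGetD cs (p.1 - 1) ' ') ∧
            PySem.Chars.isalpha (PySem.List.pyGetD cs (p.1 + 1) ' ') then acc
        else if flag = true ∧ p.1 = (cs.length:Int) - 1 then acc
        else acc ++ [p.2]) []) := by
  subst h
  exact congrArg String.ofList (pvCore cs flag)

-- ===== VERDICT (by name: the statement is the Claim_ definition above) =====
theorem replace_1_string_spec : Claim_equal_replace_1_string := by
  intro s _hdom _hpre
  show replace_1_string s = replace_1_string_alt s
  simp only [replace_1_string, replace_1_string_alt]
  refine pvMain s.toList _ _ ?_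
  cases h1 : PySem.Int.ofChars? (PySem.List.slice s.toList (some (-2)) none) with
  | some v => simp [pvLoop]
  | none =>
    cases h2 : pvFloatValid (PySem.List.slice s.toList (some (-3)) none) with
    | true => simp [pvLoop]
    | false =>
      cases h3 : PySem.List.pyGet? s.toList (-1) with
      | none => simp [pvLoop]
      | some c => by_cases hc : c = '1' <;> simp [pvLoop, hc]
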